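-- pv_equiv track=rewrite | github.com/nickyg666/NeoRunner-Python | legacy_old_neorunner/self_heal_new.py | _slug_split_words
-- ===== SOURCE A (Python) =====
-- def _slug_split_words(s: str) -> str:
--     """Split a concatenated string into likely words (helper for slug variations)."""
--     _WORDS = {
--         'the', 'of', 'and', 'for', 'with', 'oh', 'weve', 'gone', 'wee', 'all',
--         'biomes', 'biome', 'trees', 'tree', 'mods', 'mod', 'core', 'lib', 'library',
--         'config', 'api', 'forge', 'fabric', 'neo', 'craft', 'mine', 'server', 'client',
--         'world', 'extra', 'plus', 'super', 'mega', 'mini', 'max', 'pro', 'lite',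
--         'addons', 'addon', 'patch', 'fix', 'pack', 'packed', 'up', 'down',
--         'connected', 'glass', 'lanterns', 'additional', 'farming', 'blockheads',
--         'corgi', 'martijn', 'resourceful', 'creative', 'enchantment', 'description',
--         'descriptions', 'enchanted', 'ench', 'desc', 'prickle', 'sodium', 'lithium',
--         'iris', 'jade', 'curios', 'balm', 'framework', 'fusion', 'konkrete',
--         'puzzles', 'searchables', 'controlling', 'configured', 'collective',
--     }
--     result = []
--     i = 0
--     while i < len(s):
--         best = None
--         best_len = 0
--         for word in _WORDS:
--             if s[i:].startswith(word) and len(word) > best_len: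
--                 best = word
--                 best_len = len(word)
--         if best:
--             result.append(best)
--             i += best_len
--         else:
--             result.append(s[i])
--             i += 1
--     return '-'.join(result) if len(result) > 1 else s
-- ===== SOURCE B (Python) =====
-- def _slug_split_words(s: str) -> str:
--     """Split a concatenated string into likely words (helper for slug variations)."""
--     _WORDS = {
--         'the', 'of', 'and', 'for', 'with', 'oh', 'weve', 'gone', 'wee', 'all',
--         'biomes', 'biome', 'trees', 'tree', 'mods', 'mod', 'core', 'lib', 'library',
--         'config', 'api', 'forge', 'fabric', 'neo', 'craft', 'mine', 'server', 'client',
--         'world', 'extra', 'plus', 'super', 'mega', 'mini', 'max', 'pro', 'lite',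
--         'addons', 'addon', 'patch', 'fix', 'pack', 'packed', 'up', 'down',
--         'connected', 'glass', 'lanterns', 'additional', 'farming', 'blockheads',
--         'corgi', 'martijn', 'resourceful', 'creative', 'enchantment', 'description',
--         'descriptions', 'enchanted', 'ench', 'desc', 'prickle', 'sodium', 'lithium',
--         'iris', 'jade', 'curios', 'balm', 'framework', 'fusion', 'konkrete',
--         'puzzles', 'searchables', 'controlling', 'configured', 'collective',
--     }
--     maxlen = max(len(w) for w in _WORDS)
--     result = []
--     n = len(s)
--     i = 0
--     while i < n:
--         for L in range(min(maxlen, n - i), 0, -1):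
--             cand = s[i:i+L]
--             if cand in _WORDS:
--                 result.append(cand)
--                 i += L
--                 break
--         else:
--             result.append(s[i])
--             i += 1
--     return '-'.join(result) if len(result) > 1 else s
-- ===== Notes on version B (the rewrite author's own statement) =====
-- stated objective: faster
-- what changed: Instead of scanning all 79 words at every position while keeping a running longest match, B probes candidate substrings s[i:i+L] for L from min(maxlen, remaining) down to 1 with set membership and takes the first hit.
import Mathlib
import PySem

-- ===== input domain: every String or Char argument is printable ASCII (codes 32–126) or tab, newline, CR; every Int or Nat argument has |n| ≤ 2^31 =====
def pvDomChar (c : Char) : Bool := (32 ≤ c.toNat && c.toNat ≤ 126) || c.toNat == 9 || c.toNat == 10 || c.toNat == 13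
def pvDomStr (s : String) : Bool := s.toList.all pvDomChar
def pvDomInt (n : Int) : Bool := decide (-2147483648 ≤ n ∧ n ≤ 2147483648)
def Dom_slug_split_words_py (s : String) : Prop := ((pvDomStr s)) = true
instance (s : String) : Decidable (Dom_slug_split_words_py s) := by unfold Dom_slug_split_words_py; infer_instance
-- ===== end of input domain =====

set_option maxRecDepth 10000


-- B replaces A's per-position scan of all 79 words (keeping a running longest match) by a
-- descending-length probe of the substring into the word set; return value only, no mutation.

-- the _WORDS set; Python set iteration order is arbitrary and the loop's result is
-- order-independent (proved below via the longest-match characterisation), so source order is used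
def pvWords : List (List Char) :=
  ["the", "of", "and", "for", "with", "oh", "weve", "gone", "wee", "all",
   "biomes", "biome", "trees", "tree", "mods", "mod", "core", "lib", "library",
   "config", "api", "forge", "fabric", "neo", "craft", "mine", "server", "client",
   "world", "extra", "plus", "super", "mega", "mini", "max", "pro", "lite",
   "addons", "addon", "patch", "fix", "pack", "packed", "up", "down",
   "connected", "glass", "lanterns", "additional", "farming", "blockheads",
   "corgi", "martijn", "resourceful", "creative", "enchantment", "description",
   "descriptions", "enchanted", "ench", "desc", "prickle", "sodium", "lithium",
   "iris", "jade", "curios", "balm", "framework", "fusion", "konkrete",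
   "puzzles", "searchables", "controlling", "configured", "collective"].map String.toList

-- ===== PORT A =====
-- inner `for word in _WORDS` loop: state (best, best_len)
def pvStepA (rem : List Char) (st : Option (List Char) × Nat) (w : List Char) :
    Option (List Char) × Nat :=
  if w.isPrefixOf rem ∧ st.2 < w.length then (some w, w.length) else st

-- the `while i < len(s)` loop, on rem = s[i:]; in the some-branch best_len = w.length and
-- best_len ≥ 1 (the fold only sets best together with its positive length), so
-- `i += best_len` is rem.drop w.length = rest.drop (w.length - 1)
def pvLoopA : List Char → List (List Char)
  | [] => []
  | c :: rest =>
    let st := pvWords.foldl (pvStepA (c :: rest)) (none, 0)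
    match st.1 with
    | some w => w :: pvLoopA (rest.drop (w.length - 1))
    | none => [c] :: pvLoopA rest
termination_by l => l.length
decreasing_by
  all_goals simp

def slug_split_words_py (s : String) : String :=
  let result := pvLoopA s.toList
  if result.length > 1 then String.ofList (List.intercalate ['-'] result) else s

-- ===== PORT B =====
-- maxlen = max(len(w) for w in _WORDS)
def pvMaxLen : Nat := pvWords.foldl (fun m w => max m w.length) 0

-- `for L in range(k, 0, -1): if s[i:i+L] in _WORDS: …` with early break, else-clause = none
def pvProbe (rem : List Char) : Nat → Option Nat
  | 0 => none
  | (L + 1) => if rem.take (L + 1) ∈ pvWords then some (L + 1) else pvProbe rem L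

-- B's while loop on rem = s[i:]; matched L ≥ 1, so `i += L` is rest.drop (L - 1)
def pvLoopB : List Char → List (List Char)
  | [] => []
  | c :: rest =>
    match pvProbe (c :: rest) (min pvMaxLen (rest.length + 1)) with
    | some L => (c :: rest).take L :: pvLoopB (rest.drop (L - 1))
    | none => [c] :: pvLoopB rest
termination_by l => l.length
decreasing_by
  all_goals simp

def slug_split_words_py_alt (s : String) : String :=
  let result := pvLoopB s.toList
  if result.length > 1 then String.ofList (List.intercalate ['-'] result) else s

-- ===== PRECONDITION & SPEC =====
def Spec_slug_split_words_py (s : String) (out : String) : Prop := out = slug_split_words_py_alt s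
instance (s : String) (out : String) : Decidable (Spec_slug_split_words_py s out) := by unfold Spec_slug_split_words_py; infer_instance

-- ===== CLAIM (what is proved, stated in full; the proofs are below) =====
def Claim_equal_slug_split_words_py : Prop := ∀ (s : String), Dom_slug_split_words_py s → Spec_slug_split_words_py s (slug_split_words_py s)

-- ===== LEMMAS AND PROOFS =====
theorem pvWords_pos : ∀ w ∈ pvWords, 0 < w.length := by decide

theorem pvWords_le_maxLen : ∀ w ∈ pvWords, w.length ≤ pvMaxLen := by decide

-- invariant of A's inner fold
theorem foldA_inv (rem : List Char) :
    ∀ (l : List (List Char)) (st : Option (List Char) × Nat),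
    (st = (none, 0) ∨ ∃ w, w ∈ pvWords ∧ w.isPrefixOf rem ∧ st = (some w, w.length)) →
    (∀ w ∈ l, w ∈ pvWords) →
    ((l.foldl (pvStepA rem) st = (none, 0) ∨
      ∃ w, w ∈ pvWords ∧ w.isPrefixOf rem ∧ l.foldl (pvStepA rem) st = (some w, w.length)) ∧
     st.2 ≤ (l.foldl (pvStepA rem) st).2 ∧
     (∀ w ∈ l, w.isPrefixOf rem → w.length ≤ (l.foldl (pvStepA rem) st).2)) := by
  intro l
  induction l with
  | nil => intro st h _; exact ⟨h, le_refl _, by simp⟩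
  | cons a l ih =>
    intro st h hmem
    have hst' : (pvStepA rem st a = (none, 0) ∨
        ∃ w, w ∈ pvWords ∧ w.isPrefixOf rem ∧ pvStepA rem st a = (some w, w.length)) ∧
        st.2 ≤ (pvStepA rem st a).2 ∧
        (a.isPrefixOf rem → a.length ≤ (pvStepA rem st a).2) := by
      unfold pvStepA
      split
      · next hc =>
        refine ⟨Or.inr ⟨a, hmem a (by simp), hc.1, rfl⟩, ?_, ?_⟩
        · exact le_of_lt hc.2
        · intro _; exact le_refl _
      · next hc =>
        refine ⟨h, le_refl _, ?_⟩
        intro hpre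
        by_contra hlt
        exact hc ⟨hpre, by omega⟩
    have := ih (pvStepA rem st a) hst'.1 (fun w hw => hmem w (by simp [hw]))
    refine ⟨this.1, le_trans hst'.2.1 this.2.1, ?_⟩
    intro w hw hpre
    rcases List.mem_cons.mp hw with rfl | hw'
    · exact le_trans (hst'.2.2 hpre) this.2.1
    · exact this.2.2 w hw' hpre

theorem probe_eq_some (rem : List Char) :
    ∀ k L, 0 < L → L ≤ k → rem.take L ∈ pvWords →
    (∀ L', L < L' → L' ≤ k → rem.take L' ∉ pvWords) → pvProbe rem k = some L := by
  intro k
  induction k with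
  | zero => intro L h1 h2 _ _; omega
  | succ k ih =>
    intro L h1 h2 h3 h4
    unfold pvProbe
    by_cases hk : L = k + 1
    · subst hk; simp [h3]
    · have hle : L ≤ k := by omega
      have hnot : rem.take (k + 1) ∉ pvWords := h4 (k + 1) (by omega) (le_refl _)
      simp [hnot]
      exact ih L h1 hle h3 (fun L' hL1 hL2 => h4 L' hL1 (by omega))

theorem probe_eq_none (rem : List Char) :
    ∀ k, (∀ L, 0 < L → L ≤ k → rem.take L ∉ pvWords) → pvProbe rem k = none := by
  intro k
  induction k with
  | zero => intro _; simp [pvProbe]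
  | succ k ih =>
    intro h
    unfold pvProbe
    simp [h (k + 1) (by omega) (le_refl _)]
    exact ih (fun L h1 h2 => h L h1 (by omega))

-- the two while loops produce the same token list
theorem loops_eq : ∀ (n : Nat) (l : List Char), l.length ≤ n → pvLoopA l = pvLoopB l := by
  intro n
  induction n with
  | zero =>
    intro l hl
    have : l = [] := List.eq_nil_of_length_eq_zero (Nat.le_zero.mp hl)
    subst this; rw [pvLoopA, pvLoopB]
  | succ n ih =>
    intro l hl
    match l with
    | [] => rw [pvLoopA, pvLoopB]
    | c :: rest =>
      have hfold := foldA_inv (c :: rest) pvWords (none, 0) (Or.inl rfl) (fun _ h => h)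
      set st := pvWords.foldl (pvStepA (c :: rest)) (none, 0) with hst
      rcases hfold.1 with hnone | ⟨w, hwmem, hwpre, hsome⟩
      · -- no word matches: both append the single char
        have hprobe : pvProbe (c :: rest) (min pvMaxLen (rest.length + 1)) = none := by
          apply probe_eq_none
          intro L hL1 hL2 hmem
          have hlen : ((c :: rest).take L).length = L := by
            simp; omega
          have hpre : ((c :: rest).take L).isPrefixOf (c :: rest) := by
            rw [List.isPrefixOf_iff_prefix]; exact List.take_prefix _ _
          have := hfold.2.2 _ hmem hpre
          rw [hnone] at this
          rw [hlen] at this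
          omega
        rw [pvLoopA, pvLoopB]
        rw [← hst, hnone, hprobe]
        simp only
        rw [ih rest (by simpa using Nat.lt_succ_iff.mp (Nat.lt_of_lt_of_le (by simp) hl))]
      · -- longest match w: B's probe finds exactly w.length
        have hwpre' : w <+: (c :: rest) := List.isPrefixOf_iff_prefix.mp hwpre
        have hwtake : (c :: rest).take w.length = w := (List.prefix_iff_eq_take.mp hwpre').symm
        have hwlen : w.length ≤ rest.length + 1 := by
          simpa using hwpre'.length_le
        have hprobe : pvProbe (c :: rest) (min pvMaxLen (rest.length + 1)) = some w.length := by
          apply probe_eq_some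
          · exact pvWords_pos w hwmem
          · exact le_min (pvWords_le_maxLen w hwmem) hwlen
          · rw [hwtake]; exact hwmem
          · intro L' hL1 hL2 hmem
            have hL2' : L' ≤ rest.length + 1 := le_trans hL2 (min_le_right _ _)
            have hlen : ((c :: rest).take L').length = L' := by simp; omega
            have hpre : ((c :: rest).take L').isPrefixOf (c :: rest) := by
              rw [List.isPrefixOf_iff_prefix]; exact List.take_prefix _ _
            have := hfold.2.2 _ hmem hpre
            rw [hsome] at this
            rw [hlen] at this
            omega
        rw [pvLoopA, pvLoopB]
        rw [← hst, hsome, hprobe]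
        simp only [hwtake]
        have hpos := pvWords_pos w hwmem
        have : (rest.drop (w.length - 1)).length ≤ n := by
          simp at hl ⊢; omega
        rw [ih _ this]

-- ===== VERDICT (by name: the statement is the Claim_ definition above) =====
theorem slug_split_words_py_spec : Claim_equal_slug_split_words_py := by
  intro s _
  unfold Spec_slug_split_words_py slug_split_words_py slug_split_words_py_alt
  rw [loops_eq s.toList.length s.toList (le_refl _)]
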